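-- pv_equiv track=rewrite | github.com/mtrejo0/SchoolWork | 6.009/past/quiz3/quiz3/test.py | generateItems
-- ===== SOURCE A (Python) =====
-- import string
--
-- def generateItems(tag_list, num_per_tag):
--     items = []
--     names = [''] * num_per_tag
--     chars = string.ascii_lowercase[:26]
--     for i in range(len(tag_list)):
--         tags = tag_list[i % len(tag_list)]
--         for j in range(num_per_tag):
--             names[j] += chars[j]
--             items.append((names[j], tags))
--     return items
-- ===== SOURCE B (Python) =====
-- import string
--
-- def generateItems(tag_list, num_per_tag):
--     chars = string.ascii_lowercase
--     return [(chars[j] * (i + 1), tag)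
--             for i, tag in enumerate(tag_list)
--             for j in range(num_per_tag)]
-- ===== Notes on version B (the rewrite author's own statement) =====
-- stated objective: simpler
-- what changed: A maintains a mutable names array that accumulates one character per outer iteration; B eliminates that cross-iteration state entirely and emits each pair directly from the closed form chars[j]*(i+1) in a single flat comprehension over enumerate(tag_list).
import Mathlib
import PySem

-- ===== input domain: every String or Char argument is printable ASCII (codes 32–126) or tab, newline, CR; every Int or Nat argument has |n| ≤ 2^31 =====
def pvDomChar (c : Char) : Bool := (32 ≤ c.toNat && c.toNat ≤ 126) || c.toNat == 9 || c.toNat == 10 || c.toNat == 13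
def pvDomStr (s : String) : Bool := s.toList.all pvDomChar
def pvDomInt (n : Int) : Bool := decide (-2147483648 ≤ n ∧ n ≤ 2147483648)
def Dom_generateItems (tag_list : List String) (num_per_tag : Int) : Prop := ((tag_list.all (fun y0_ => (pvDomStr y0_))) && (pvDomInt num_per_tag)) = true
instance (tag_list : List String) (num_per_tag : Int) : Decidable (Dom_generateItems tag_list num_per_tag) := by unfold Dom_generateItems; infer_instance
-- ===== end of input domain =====

-- B replaces A's mutable `names` accumulator (cross-iteration string state) by the closed form
-- chars[j] * (i + 1) in a flat comprehension over enumerate(tag_list): simpler, no mutable state.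

-- ===== PORT A =====
-- strings are handled on the List Char side (PySem.Chars convention); String.ofList packs the result
def generateItems (tag_list : List String) (num_per_tag : Int) : List (String × String) :=
  -- items = []; names = [''] * num_per_tag  (Python list-repeat clamps negatives to empty)
  -- chars = string.ascii_lowercase[:26]  ([:26] is the identity slice of the 26-letter string)
  let chars : List Char := "abcdefghijklmnopqrstuvwxyz".toList
  let res :=
    (PySem.List.pyRange 0 (PySem.List.len tag_list) 1).foldl
      (fun (st : List (String × String) × List (List Char)) i =>
        let tags := PySem.List.pyGetD tag_list (PySem.Int.mod i (PySem.List.len tag_list)) ""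
        (PySem.List.pyRange 0 num_per_tag 1).foldl
          (fun (st : List (String × String) × List (List Char)) j =>
            -- names[j] += chars[j]  (chars[j] total via pyGetD; in range under Pre_)
            let name := PySem.List.pyGetD st.2 j [] ++ [PySem.List.pyGetD chars j ' ']
            (st.1 ++ [(String.ofList name, tags)], PySem.List.pySetD st.2 j name)) st)
      ([], List.replicate num_per_tag.toNat [])
  res.1

-- ===== PORT B =====
def generateItems_alt (tag_list : List String) (num_per_tag : Int) : List (String × String) :=
  let chars : List Char := "abcdefghijklmnopqrstuvwxyz".toList
  (PySem.List.enumerate tag_list 0).flatMap (fun p =>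
    (PySem.List.pyRange 0 num_per_tag 1).map (fun j =>
      -- chars[j] * (i + 1): a string of i+1 copies of chars[j]
      (String.ofList (List.replicate (p.1 + 1).toNat (PySem.List.pyGetD chars j ' ')), p.2)))

-- ===== PRECONDITION & SPEC =====
-- Pre_ excludes exactly the inputs where Python A raises IndexError (chars[j] with j ≥ 26,
-- reached iff the inner loop body runs, i.e. tag_list nonempty and num_per_tag > 26); B raises there too.
def Pre_generateItems (tag_list : List String) (num_per_tag : Int) : Prop :=
  tag_list = [] ∨ num_per_tag ≤ 26
instance (tag_list : List String) (num_per_tag : Int) : Decidable (Pre_generateItems tag_list num_per_tag) := by unfold Pre_generateItems; infer_instance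
def pvWitness_generateItems : List String × Int := (["red", "blue"], 3)

def Spec_generateItems (tag_list : List String) (num_per_tag : Int) (out : List (String × String)) : Prop := out = generateItems_alt tag_list num_per_tag
instance (tag_list : List String) (num_per_tag : Int) (out : List (String × String)) : Decidable (Spec_generateItems tag_list num_per_tag out) := by unfold Spec_generateItems; infer_instance

-- ===== CLAIM (what is proved, stated in full; the proofs are below) =====
def Claim_equal_generateItems : Prop := ∀ (tag_list : List String) (num_per_tag : Int), Dom_generateItems tag_list num_per_tag → Pre_generateItems tag_list num_per_tag → Spec_generateItems tag_list num_per_tag (generateItems tag_list num_per_tag)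

-- ===== LEMMAS AND PROOFS =====

-- the default-read character A appends / B replicates at column j
def pvCharD (j : Nat) : Char :=
  PySem.List.pyGetD ("abcdefghijklmnopqrstuvwxyz".toList) (j : Int) ' '

-- names array after k completed outer iterations: names[j] = chars[j] * k
def pvNames (n k : Nat) : List (List Char) :=
  (List.range n).map (fun j => List.replicate k (pvCharD j))

-- one inner step, in the shape A's port folds with
def pvStep (tags : String) (st : List (String × String) × List (List Char)) (j : Int) :
    List (String × String) × List (List Char) :=
  let name := PySem.List.pyGetD st.2 j [] ++ [PySem.List.pyGetD ("abcdefghijklmnopqrstuvwxyz".toList) j ' ']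
  (st.1 ++ [(String.ofList name, tags)], PySem.List.pySetD st.2 j name)

-- the item row B produces for outer index i (i+1 copies of each column character)
def pvRow (tags : String) (n i : Nat) : List (String × String) :=
  (List.range n).map (fun j => (String.ofList (List.replicate (i+1) (pvCharD j)), tags))

-- range(a, b) over a nonnegative bound is range(a, toNat b)
theorem pvRange_toNat (num : Int) :
    PySem.List.pyRange 0 num 1 = PySem.List.pyRange 0 (num.toNat : Int) 1 := by
  by_cases h : 0 ≤ num
  · rw [Int.toNat_of_nonneg h]
  · rw [PySem.List.pyRange_one_eq_nil (by omega), PySem.List.pyRange_one_eq_nil (by omega)]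

-- prefix-of-inner-loop invariant: after j = 0..m-1 (m ≤ n) of outer stage k
theorem pvInner (tags : String) (acc : List (String × String)) (n k : Nat) :
    ∀ m : Nat, m ≤ n →
    (PySem.List.pyRange 0 (m : Int) 1).foldl (pvStep tags) (acc, pvNames n k) =
      (acc ++ ((List.range m).map (fun j => (String.ofList (List.replicate (k+1) (pvCharD j)), tags))),
       (List.range n).map (fun j => List.replicate (if j < m then k+1 else k) (pvCharD j))) := by
  intro m
  induction m with
  | zero =>
    intro _
    simp [PySem.List.pyRange_one_eq_nil, pvNames]
  | succ m ih =>
    intro hm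
    have h0 : (0 : Int) ≤ (m : Int) := by positivity
    have hcast : ((m + 1 : Nat) : Int) = (m : Int) + 1 := by push_cast; ring
    rw [hcast, PySem.List.pyRange_one_succ_right h0, List.foldl_append, ih (by omega)]
    simp only [List.foldl_cons, List.foldl_nil]
    have hmn : m < n := by omega
    have hget : PySem.List.pyGetD
        ((List.range n).map (fun j => List.replicate (if j < m then k+1 else k) (pvCharD j)))
        (m : Int) [] = List.replicate k (pvCharD m) := by
      rw [PySem.List.pyGetD_natCast]
      rw [List.getD_eq_getElem _ _ (by simpa using hmn)]
      simp
    have hchar : PySem.List.pyGetD ("abcdefghijklmnopqrstuvwxyz".toList) ((m : Nat) : Int) ' '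
        = pvCharD m := rfl
    have hname : List.replicate k (pvCharD m) ++ [pvCharD m]
        = List.replicate (k+1) (pvCharD m) := List.replicate_succ'.symm
    unfold pvStep
    simp only [hget, hchar, hname, Prod.mk.injEq]
    constructor
    · rw [List.append_assoc, List.range_succ, List.map_append]
      rfl
    · rw [PySem.List.pySetD_natCast]
      apply List.ext_getElem
      · simp
      · intro j h1 h2
        simp only [List.getElem_set, List.getElem_map, List.getElem_range] at *
        by_cases hj : j = m
        · subst hj; simp
        · have hlt : (j < m) = (j < m + 1) := by
            by_cases hlt : j < m <;> simp [hlt] <;> omega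
          simp [Ne.symm hj, hlt]

-- the inner loop run to completion advances pvNames one stage and appends pvRow
theorem pvInnerFull (tags : String) (acc : List (String × String)) (num : Int) (k : Nat) :
    (PySem.List.pyRange 0 num 1).foldl (pvStep tags) (acc, pvNames num.toNat k) =
      (acc ++ pvRow tags num.toNat k, pvNames num.toNat (k+1)) := by
  rw [pvRange_toNat, pvInner tags acc num.toNat k num.toNat le_rfl]
  unfold pvRow pvNames
  congr 1
  apply List.map_congr_left
  intro j hj
  simp only [List.mem_range] at hj
  simp [hj]

-- outer-loop invariant over the first m tags
theorem pvOuter (tag_list : List String) (num : Int) :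
    ∀ m : Nat, m ≤ tag_list.length →
    (PySem.List.pyRange 0 (m : Int) 1).foldl
      (fun (st : List (String × String) × List (List Char)) i =>
        (PySem.List.pyRange 0 num 1).foldl
          (pvStep (PySem.List.pyGetD tag_list (PySem.Int.mod i (PySem.List.len tag_list)) "")) st)
      ([], pvNames num.toNat 0) =
      ((List.range m).flatMap (fun i => pvRow (tag_list.getD i "") num.toNat i),
       pvNames num.toNat m) := by
  intro m
  induction m with
  | zero =>
    intro _
    simp [PySem.List.pyRange_one_eq_nil]
  | succ m ih =>
    intro hm
    have h0 : (0 : Int) ≤ (m : Int) := by positivity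
    have hcast : ((m + 1 : Nat) : Int) = (m : Int) + 1 := by push_cast; ring
    rw [hcast, PySem.List.pyRange_one_succ_right h0, List.foldl_append, ih (by omega)]
    simp only [List.foldl_cons, List.foldl_nil]
    have htag : PySem.List.pyGetD tag_list (PySem.Int.mod ((m : Nat) : Int) (PySem.List.len tag_list)) ""
        = tag_list.getD m "" := by
      rw [PySem.List.len_eq, PySem.Int.mod_natCast, Nat.mod_eq_of_lt (by omega),
        PySem.List.pyGetD_natCast]
    rw [htag, pvInnerFull]
    rw [List.range_succ, List.flatMap_append]
    simp

-- cast bridges: a pyRange over a Nat-cast bound is a List.range traversal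
theorem pvMap_pyRange_nat {β : Type} (n : Nat) (g : Int → β) :
    (PySem.List.pyRange 0 (n : Int) 1).map g = (List.range n).map (fun k : Nat => g (k : Int)) := by
  rw [PySem.List.pyRange_one]; simp

theorem pvFlatMap_pyRange_nat {β : Type} (n : Nat) (g : Int → List β) :
    (PySem.List.pyRange 0 (n : Int) 1).flatMap g = (List.range n).flatMap (fun k : Nat => g (k : Int)) := by
  rw [PySem.List.pyRange_one]; simp [List.flatMap_map]

-- B's value, re-expressed over List.range indices
theorem pvAlt_eq (tag_list : List String) (num : Int) :
    generateItems_alt tag_list num =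
      (List.range tag_list.length).flatMap (fun i => pvRow (tag_list.getD i "") num.toNat i) := by
  unfold generateItems_alt
  dsimp only
  rw [PySem.List.enumerate_eq_map_pyRange tag_list "", PySem.List.len_eq, List.flatMap_map,
    pvFlatMap_pyRange_nat]
  refine congrArg (fun f => List.flatMap f (List.range tag_list.length)) ?_
  funext i
  rw [pvRange_toNat num, pvMap_pyRange_nat]
  unfold pvRow
  refine congrArg (fun f => List.map f (List.range num.toNat)) ?_
  funext j
  simp only [PySem.List.pyGetD_natCast, pvCharD, Prod.mk.injEq]
  refine ⟨?_, trivial⟩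
  rw [show ((i : Int) + 1).toNat = i + 1 by omega]

-- ===== VERDICT (by name: the statement is the Claim_ definition above) =====
theorem generateItems_spec : Claim_equal_generateItems := by
  intro tag_list num _ _
  unfold Spec_generateItems generateItems
  dsimp only
  rw [pvAlt_eq]
  have hn : List.replicate num.toNat ([] : List Char) = pvNames num.toNat 0 := by
    simp [pvNames]
  rw [hn]
  exact congrArg Prod.fst (pvOuter tag_list num tag_list.length le_rfl)
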